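-- pv_equiv track=rewrite | github.com/brandon-fremin/carcassonne | server/src/proto/protogen.py | get_proto_lines
-- ===== SOURCE A (Python) =====
-- from typing import List
--
-- def get_proto_lines(proto: str) -> List[str]:
--     implicit_end_chars = [ "{", "}" ]
--     END_CHAR = ";"
--     for char in implicit_end_chars:
--         proto = proto.replace(f"{char}", f"{char}{END_CHAR}")
--     def clean(s: str) -> str:
--         s = s.strip()
--         return ' '.join(s.split())
--     lines = [clean(line) for line in proto.split(END_CHAR)]
--     lines = filter(lambda line: len(line) > 0, lines)
--     return list(lines)
-- ===== SOURCE B (Python) =====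
-- from typing import List
--
-- def get_proto_lines(proto: str) -> List[str]:
--     # single-pass scanner: flush buffer on ';' and after '{'/'}'
--     def clean(s: str) -> str:
--         s = s.strip()
--         return ' '.join(s.split())
--     lines: List[str] = []
--     buf: List[str] = []
--     def flush() -> None:
--         cleaned = clean(''.join(buf))
--         if cleaned:
--             lines.append(cleaned)
--         buf.clear()
--     for ch in proto:
--         if ch == ';':
--             flush()
--         elif ch == '{' or ch == '}':
--             buf.append(ch)
--             flush()
--         else:
--             buf.append(ch)
--     flush()
--     return lines
-- ===== Notes on version B (the rewrite author's own statement) =====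
-- stated objective: alternative
-- what changed: Replaces A's pipeline (rewrite the whole string twice to inject separators after braces, split on the separator, then clean each piece) by a single left-to-right character scanner that keeps a current buffer and flushes it at each separator and after each brace.
import Mathlib
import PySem

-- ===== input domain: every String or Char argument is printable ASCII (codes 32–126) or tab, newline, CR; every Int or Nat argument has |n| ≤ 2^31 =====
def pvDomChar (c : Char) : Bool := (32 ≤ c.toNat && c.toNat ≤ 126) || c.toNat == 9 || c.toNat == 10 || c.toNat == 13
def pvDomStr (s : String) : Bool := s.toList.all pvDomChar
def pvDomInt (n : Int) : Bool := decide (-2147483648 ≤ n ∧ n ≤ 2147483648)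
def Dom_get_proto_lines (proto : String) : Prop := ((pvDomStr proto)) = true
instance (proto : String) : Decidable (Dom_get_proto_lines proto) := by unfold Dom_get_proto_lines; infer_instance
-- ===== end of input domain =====

-- B replaces A's replace-then-split pipeline by a single-pass character scanner over the input (same output; objective: alternative decomposition).

-- shared helper: both Pythons define the identical local 'clean'
def pyClean (s : String) : String :=
  let s := PySem.Str.strip s
  PySem.Str.join " " (PySem.Str.split₀ s)

-- ===== PORT A =====
def get_proto_lines (proto : String) : List String :=
  -- for char in ["{", "}"]: proto = proto.replace(char, char + ";")
  let proto := ['{', '}'].foldl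
    (fun p ch => PySem.Str.replace p (String.ofList [ch]) (String.ofList [ch, ';'])) proto
  -- lines = [clean(line) for line in proto.split(";")]
  let lines := ((PySem.Str.split? proto ";").getD []).map pyClean
  -- list(filter(lambda line: len(line) > 0, lines))
  lines.filter (fun l => decide (0 < PySem.Str.len l))

-- ===== PORT B =====
-- flush(): clean the buffer, keep it if non-empty, reset the buffer
def bFlush (lines : List String) (buf : List Char) : List String :=
  let cleaned := pyClean (String.ofList buf)
  if cleaned = "" then lines else lines ++ [cleaned]

def bStep (st : List String × List Char) (c : Char) : List String × List Char :=
  if c = ';' then (bFlush st.1 st.2, [])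
  else if c = '{' ∨ c = '}' then (bFlush st.1 (st.2 ++ [c]), [])
  else (st.1, st.2 ++ [c])

def get_proto_lines_alt (proto : String) : List String :=
  let st := proto.toList.foldl bStep ([], [])
  bFlush st.1 st.2

-- ===== PRECONDITION & SPEC =====
def Spec_get_proto_lines (proto : String) (out : List String) : Prop := out = get_proto_lines_alt proto
instance (proto : String) (out : List String) : Decidable (Spec_get_proto_lines proto out) := by unfold Spec_get_proto_lines; infer_instance

-- ===== CLAIM (what is proved, stated in full; the proofs are below) =====
def Claim_equal_get_proto_lines : Prop := ∀ (proto : String), Dom_get_proto_lines proto → Spec_get_proto_lines proto (get_proto_lines proto)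

-- ===== LEMMAS AND PROOFS =====

-- prepend a buffer onto the head segment
def consHead (b : List Char) : List (List Char) → List (List Char)
  | [] => [b]
  | h :: t => (b ++ h) :: t

-- structural characterization of splitting on the separator
def segsSemi : List Char → List (List Char)
  | [] => [[]]
  | c :: t => if c = ';' then [] :: segsSemi t else consHead [c] (segsSemi t)

-- the combined effect of the two brace replacements on one character
def gBrace (c : Char) : List Char := if c = '{' ∨ c = '}' then [c, ';'] else [c]

-- segmentation of the brace-expanded string, directly on the input
def segsRep : List Char → List (List Char)
  | [] => [[]]
  | c :: t =>
    if c = ';' then [] :: segsRep t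
    else if c = '{' ∨ c = '}' then [c] :: segsRep t
    else consHead [c] (segsRep t)

def cleanChars (cs : List Char) : List Char :=
  PySem.Chars.join [' '] (PySem.Chars.split₀ (PySem.Chars.strip cs))

def keepStr (L : List (List Char)) : List String :=
  ((L.map cleanChars).filter (fun x => !x.isEmpty)).map String.ofList

theorem replace_go_step (a c : Char) (t new acc : List Char) (f : Nat) :
    PySem.Chars.replace.go [a] new (f+1) (c::t) acc
      = if a = c then PySem.Chars.replace.go [a] new f t (new.reverse ++ acc)
        else PySem.Chars.replace.go [a] new f t (c :: acc) := by
  rw [PySem.Chars.replace.go.eq_def]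
  by_cases h : a = c
  · simp [List.isPrefixOf, h]
  · simp [List.isPrefixOf, h]

theorem replace_go_single (a : Char) (new : List Char) :
    ∀ (l : List Char) (fuel : Nat) (acc : List Char), l.length ≤ fuel →
    PySem.Chars.replace.go [a] new fuel l acc
      = acc.reverse ++ l.flatMap (fun c => if c = a then new else [c]) := by
  intro l
  induction l with
  | nil =>
    intro fuel acc _
    cases fuel <;> simp [PySem.Chars.replace.go]
  | cons c t ih =>
    intro fuel acc h
    cases fuel with
    | zero => simp at h
    | succ f =>
      rw [replace_go_step]
      by_cases hc : a = c
      · rw [if_pos hc, ih f (new.reverse ++ acc) (by simpa using h)]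
        simp [hc.symm]
      · rw [if_neg hc, ih f (c :: acc) (by simpa using h)]
        simp [Ne.symm hc]

theorem replace_single (s : List Char) (a : Char) (new : List Char) :
    PySem.Chars.replace s [a] new = s.flatMap (fun c => if c = a then new else [c]) := by
  rw [PySem.Chars.replace]
  simp only [List.isEmpty_cons, if_neg (by simp : ¬ (false = true))]
  simpa using replace_go_single a new s s.length [] (le_refl _)

theorem segsSemi_ne_nil (l : List Char) : segsSemi l ≠ [] := by
  cases l with
  | nil => simp [segsSemi]
  | cons c t => by_cases h : c = ';' <;> simp only [segsSemi, h] <;> simp <;> cases hs : segsSemi t <;> simp [consHead]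

theorem consHead_nil (L : List (List Char)) (h : L ≠ []) : consHead [] L = L := by
  cases L with
  | nil => exact absurd rfl h
  | cons a t => simp [consHead]

theorem consHead_consHead (b b' : List Char) (L : List (List Char)) :
    consHead b (consHead b' L) = consHead (b ++ b') L := by
  cases L <;> simp [consHead]

theorem splitOn_go_step (c : Char) (t cur : List Char) (acc : List (List Char)) (f : Nat) :
    PySem.Chars.splitOn.go [';'] (f+1) (c::t) cur acc
      = if c = ';' then PySem.Chars.splitOn.go [';'] f t [] (cur.reverse :: acc)
        else PySem.Chars.splitOn.go [';'] f t (c :: cur) acc := by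
  rw [PySem.Chars.splitOn.go.eq_def]
  by_cases h : c = ';'
  · simp [List.isPrefixOf, h]
  · simp [List.isPrefixOf, h, Ne.symm h]

theorem splitOn_go_semi :
    ∀ (l : List Char) (fuel : Nat) (cur : List Char) (acc : List (List Char)), l.length ≤ fuel →
    PySem.Chars.splitOn.go [';'] fuel l cur acc
      = acc.reverse ++ consHead cur.reverse (segsSemi l) := by
  intro l
  induction l with
  | nil =>
    intro fuel cur acc _
    cases fuel <;> simp [PySem.Chars.splitOn.go, segsSemi, consHead]
  | cons c t ih =>
    intro fuel cur acc h
    cases fuel with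
    | zero => simp at h
    | succ f =>
      rw [splitOn_go_step]
      by_cases hc : c = ';'
      · rw [if_pos hc, ih f [] (cur.reverse :: acc) (by simpa using h)]
        simp only [List.reverse_nil]
        rw [consHead_nil _ (segsSemi_ne_nil t)]
        simp [segsSemi, hc, consHead]
      · rw [if_neg hc, ih f (c :: cur) acc (by simpa using h)]
        simp [segsSemi, hc, consHead_consHead]

theorem splitOn_semi (s : List Char) : PySem.Chars.splitOn s [';'] = segsSemi s := by
  rw [PySem.Chars.splitOn]
  rw [splitOn_go_semi s (s.length + 1) [] [] (by omega)]
  rw [List.reverse_nil, List.reverse_nil, consHead_nil _ (segsSemi_ne_nil s)]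
  simp

theorem segsSemi_flatMap (s : List Char) : segsSemi (s.flatMap gBrace) = segsRep s := by
  induction s with
  | nil => simp [segsRep, segsSemi]
  | cons c t ih =>
    rw [List.flatMap_cons]
    by_cases h1 : c = ';'
    · have hb : ¬ (c = '{' ∨ c = '}') := by subst h1; decide
      simp [gBrace, h1, segsSemi, segsRep, ih]
    · by_cases h2 : c = '{' ∨ c = '}'
      · have hne : ¬ c = ';' := h1
        simp only [gBrace, if_pos h2, List.cons_append, List.nil_append]
        rw [show segsSemi (c :: ';' :: t.flatMap gBrace)
              = consHead [c] (segsSemi (';' :: t.flatMap gBrace)) by simp [segsSemi, hne]]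
        rw [show segsSemi (';' :: t.flatMap gBrace) = [] :: segsSemi (t.flatMap gBrace) by simp [segsSemi]]
        simp [consHead, segsRep, hne, h2, ih]
      · simp [gBrace, h1, h2, segsSemi, segsRep, ih]

theorem rep_eq_flatMap (s : List Char) :
    PySem.Chars.replace (PySem.Chars.replace s ['{'] ['{', ';']) ['}'] ['}', ';']
      = s.flatMap gBrace := by
  rw [replace_single, replace_single, List.flatMap_assoc]
  refine List.flatMap_congr ?_
  intro c _
  by_cases h1 : c = '{'
  · subst h1; decide
  · by_cases h2 : c = '}'
    · subst h2; decide
    · simp [h1, h2, gBrace]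

theorem pyClean_ofList (cs : List Char) :
    pyClean (String.ofList cs) = String.ofList (cleanChars cs) := by
  simp [pyClean, cleanChars, PySem.Str.strip, PySem.Str.split₀, PySem.Str.join,
    Function.comp_def]

set_option maxHeartbeats 1600000 in
theorem portA_eq_keepStr (proto : String) :
    get_proto_lines proto = keepStr (segsRep proto.toList) := by
  rw [get_proto_lines]
  simp only [List.foldl_cons, List.foldl_nil]
  have hrep : (PySem.Str.replace
      (PySem.Str.replace proto (String.ofList ['{']) (String.ofList ['{', ';']))
      (String.ofList ['}']) (String.ofList ['}', ';'])).toList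
      = proto.toList.flatMap gBrace := by
    simp only [PySem.Str.replace, String.toList_ofList]
    exact rep_eq_flatMap _
  have hsplit : PySem.Str.split? (PySem.Str.replace
      (PySem.Str.replace proto (String.ofList ['{']) (String.ofList ['{', ';']))
      (String.ofList ['}']) (String.ofList ['}', ';'])) ";"
      = some ((segsRep proto.toList).map String.ofList) := by
    rw [PySem.Str.split?]
    rw [show (";" : String).toList = [';'] from rfl]
    rw [PySem.Chars.split?]
    rw [if_neg (by simp)]
    rw [hrep, splitOn_semi, segsSemi_flatMap]
    simp
  rw [hsplit]
  simp only [Option.getD_some, List.map_map]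
  have hmap : (segsRep proto.toList).map (pyClean ∘ String.ofList)
      = ((segsRep proto.toList).map cleanChars).map String.ofList := by
    simp [Function.comp_def, pyClean_ofList]
  have hfil : ∀ cs ∈ (segsRep proto.toList).map cleanChars,
      ((fun l => decide (0 < PySem.Str.len l)) ∘ String.ofList) cs = !cs.isEmpty := by
    intro cs _
    simp only [Function.comp_apply, PySem.Str.len, String.toList_ofList]
    cases cs <;> simp
  rw [hmap, List.filter_map, List.filter_congr hfil, keepStr]

def kOne (buf : List Char) : List String :=
  if (cleanChars buf).isEmpty then [] else [String.ofList (cleanChars buf)]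

theorem bFlush_eq (lines : List String) (buf : List Char) :
    bFlush lines buf = lines ++ kOne buf := by
  rw [bFlush, pyClean_ofList, kOne]
  by_cases h : (cleanChars buf).isEmpty
  · have : String.ofList (cleanChars buf) = "" := by
      have : cleanChars buf = [] := by simpa using h
      simp [this]
    simp [this, h]
  · have hne : String.ofList (cleanChars buf) ≠ "" := by
      intro e
      have : cleanChars buf = [] := by
        have := congrArg String.toList e
        simpa using this
      simp [this] at h
    simp [hne, h]

theorem keepStr_cons (h : List Char) (t : List (List Char)) :
    keepStr (h :: t) = kOne h ++ keepStr t := by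
  by_cases hh : (cleanChars h).isEmpty <;> simp [keepStr, kOne, hh]

theorem segsRep_ne_nil (l : List Char) : segsRep l ≠ [] := by
  cases l with
  | nil => simp [segsRep]
  | cons c t =>
    by_cases h1 : c = ';'
    · simp [segsRep, h1]
    · by_cases h2 : c = '{' ∨ c = '}' <;> simp [segsRep, h1, h2] <;> cases hs : segsRep t <;> simp [consHead]

theorem scan_invariant :
    ∀ (l : List Char) (lines : List String) (buf : List Char),
    (let st := l.foldl bStep (lines, buf); bFlush st.1 st.2)
      = lines ++ keepStr (consHead buf (segsRep l)) := by
  intro l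
  induction l with
  | nil =>
    intro lines buf
    simp only [List.foldl_nil, bFlush_eq, segsRep, consHead, List.append_nil, keepStr, List.map_cons,
      List.map_nil]
    by_cases hh : (cleanChars buf).isEmpty <;> simp [kOne, hh, List.filter]
  | cons c t ih =>
    intro lines buf
    simp only [List.foldl_cons]
    by_cases h1 : c = ';'
    · simp only [bStep, if_pos h1]
      rw [ih (bFlush lines buf) []]
      rw [bFlush_eq]
      rw [consHead_nil _ (segsRep_ne_nil t)]
      simp [segsRep, h1, consHead, keepStr_cons]
    · by_cases h2 : c = '{' ∨ c = '}'
      · simp only [bStep, if_neg h1, if_pos h2]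
        rw [ih (bFlush lines (buf ++ [c])) []]
        rw [bFlush_eq]
        rw [consHead_nil _ (segsRep_ne_nil t)]
        simp [segsRep, h1, h2, consHead, keepStr_cons]
      · simp only [bStep, if_neg h1, if_neg h2]
        rw [ih lines (buf ++ [c])]
        rw [segsRep]
        simp only [if_neg h1, if_neg h2]
        rw [consHead_consHead]

theorem portB_eq_keepStr (proto : String) :
    get_proto_lines_alt proto = keepStr (segsRep proto.toList) := by
  rw [get_proto_lines_alt]
  rw [scan_invariant proto.toList [] []]
  rw [consHead_nil _ (segsRep_ne_nil proto.toList)]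
  simp

-- ===== VERDICT (by name: the statement is the Claim_ definition above) =====
theorem get_proto_lines_spec : Claim_equal_get_proto_lines := by
  intro proto _
  unfold Spec_get_proto_lines
  rw [portA_eq_keepStr, portB_eq_keepStr]
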